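-- pv_equiv track=rewrite | github.com/unarbos/ninja | agent.py | _truncate_around_error
-- ===== SOURCE A (Python) =====
-- from typing import Any, Dict, Iterable, List, Optional, Tuple
--
-- def _truncate(text: str, max_chars: int) -> str:
--     if len(text) <= max_chars:
--         return text
--     half = max_chars // 2
--     return (
--         text[:half]
--         + "\n\n...[truncated "
--         + str(len(text) - max_chars)
--         + " chars]...\n\n"
--         + text[-half:]
--     )
--
-- _ERROR_MARKERS: Tuple[str, ...] = (
--     "Traceback (most recent call last)",
--     "AssertionError",
--     "TypeError",
--     "ValueError",
--     "KeyError",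
--     "AttributeError",
--     "ImportError",
--     "ModuleNotFoundError",
--     "SyntaxError",
--     "RuntimeError",
--     "ReferenceError",
--     "NameError",
--     "FAIL ",
--     "FAILED ",
--     "error TS",
--     "panic:",
-- )
--
-- def _truncate_around_error(text: str, max_chars: int) -> str:
--     """Truncate long output around the first actionable error marker."""
--     if len(text) <= max_chars:
--         return text
--     first_marker = -1
--     for marker in _ERROR_MARKERS:
--         idx = text.find(marker)
--         if idx >= 0 and (first_marker < 0 or idx < first_marker):
--             first_marker = idx
--     half = max_chars // 2
--     if first_marker < 0 or first_marker < half or first_marker > len(text) - half: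
--         return _truncate(text, max_chars)
--     start = max(0, first_marker - max_chars // 3)
--     end = min(len(text), start + max_chars)
--     prefix = "" if start == 0 else f"...[head {start} chars]...\n"
--     suffix = "" if end == len(text) else f"\n...[tail {len(text) - end} chars]..."
--     return prefix + text[start:end] + suffix
-- ===== SOURCE B (Python) =====
-- from typing import Tuple
--
-- _ERROR_MARKERS: Tuple[str, ...] = (
--     "Traceback (most recent call last)",
--     "AssertionError",
--     "TypeError",
--     "ValueError",
--     "KeyError",
--     "AttributeError",
--     "ImportError",
--     "ModuleNotFoundError",
--     "SyntaxError",
--     "RuntimeError",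
--     "ReferenceError",
--     "NameError",
--     "FAIL ",
--     "FAILED ",
--     "error TS",
--     "panic:",
-- )
--
--
-- def _truncate_around_error(text: str, max_chars: int) -> str:
--     """Truncate long output around the first actionable error marker
--     (single left-to-right scan for the earliest marker instead of one
--     find() pass per marker)."""
--     n = len(text)
--     if n <= max_chars:
--         return text
--     i = next((j for j in range(n) if text.startswith(_ERROR_MARKERS, j)), -1)
--     half = max_chars // 2
--     if 0 <= i and half <= i <= n - half:
--         start = max(0, i - max_chars // 3)
--         end = min(n, start + max_chars)
--         prefix = "" if start == 0 else f"...[head {start} chars]...\n"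
--         suffix = "" if end == n else f"\n...[tail {n - end} chars]..."
--         return prefix + text[start:end] + suffix
--     return (
--         text[:half]
--         + "\n\n...[truncated "
--         + str(n - max_chars)
--         + " chars]...\n\n"
--         + text[-half:]
--     )
-- ===== Notes on version B (the rewrite author's own statement) =====
-- stated objective: alternative
-- what changed: B finds the earliest error marker by a single left-to-right positional scan (first index j with text.startswith(_ERROR_MARKERS, j)) instead of A's sixteen separate str.find passes whose minimum is taken, and inlines the fallback _truncate helper.
import Mathlib
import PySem

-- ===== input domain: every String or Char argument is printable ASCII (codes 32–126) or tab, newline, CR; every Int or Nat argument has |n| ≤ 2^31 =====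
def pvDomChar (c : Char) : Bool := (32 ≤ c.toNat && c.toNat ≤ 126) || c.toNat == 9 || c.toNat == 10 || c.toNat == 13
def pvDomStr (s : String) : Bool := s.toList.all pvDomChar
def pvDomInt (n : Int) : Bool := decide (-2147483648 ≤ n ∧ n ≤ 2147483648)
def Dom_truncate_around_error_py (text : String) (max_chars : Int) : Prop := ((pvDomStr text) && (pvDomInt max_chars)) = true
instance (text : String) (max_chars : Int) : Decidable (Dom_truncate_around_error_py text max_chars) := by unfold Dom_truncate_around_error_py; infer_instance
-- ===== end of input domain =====

-- B replaces A's sixteen per-marker str.find scans by one left-to-right scan for the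
-- earliest position where any marker starts (objective: alternative, not claimed faster).

def pvMarkers : List (List Char) :=
  [ "Traceback (most recent call last)".toList
  , "AssertionError".toList
  , "TypeError".toList
  , "ValueError".toList
  , "KeyError".toList
  , "AttributeError".toList
  , "ImportError".toList
  , "ModuleNotFoundError".toList
  , "SyntaxError".toList
  , "RuntimeError".toList
  , "ReferenceError".toList
  , "NameError".toList
  , "FAIL ".toList
  , "FAILED ".toList
  , "error TS".toList
  , "panic:".toList ]

-- ===== PORT A =====
-- helper _truncate, transliterated
def pvTruncate (t : List Char) (max_chars : Int) : List Char :=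
  if (t.length : Int) ≤ max_chars then t
  else
    let half := PySem.Int.floordiv max_chars 2
    PySem.List.slice t none (some half)
      ++ "\n\n...[truncated ".toList
      ++ PySem.Int.toChars ((t.length : Int) - max_chars)
      ++ " chars]...\n\n".toList
      ++ PySem.List.slice t (some (-half)) none

-- the body of A's `for marker in _ERROR_MARKERS` loop
def pvStepA (t : List Char) (fm : Int) (m : List Char) : Int :=
  let idx := PySem.Chars.find t m
  if 0 ≤ idx ∧ (fm < 0 ∨ idx < fm) then idx else fm

def truncate_around_error_py (text : String) (max_chars : Int) : String :=
  let t := text.toList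
  if (t.length : Int) ≤ max_chars then text
  else
    let first_marker := pvMarkers.foldl (pvStepA t) (-1)
    let half := PySem.Int.floordiv max_chars 2
    if first_marker < 0 ∨ first_marker < half ∨ first_marker > (t.length : Int) - half then
      String.ofList (pvTruncate t max_chars)
    else
      let start := max 0 (first_marker - PySem.Int.floordiv max_chars 3)
      let stop := min ((t.length : Int)) (start + max_chars)
      let pre := if start = 0 then ([] : List Char)
                 else "...[head ".toList ++ PySem.Int.toChars start ++ " chars]...\n".toList
      let suf := if stop = (t.length : Int) then ([] : List Char)
                 else "\n...[tail ".toList ++ PySem.Int.toChars ((t.length : Int) - stop) ++ " chars]...".toList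
      String.ofList (pre ++ PySem.List.slice t (some start) (some stop) ++ suf)

-- ===== PORT B =====
-- text.startswith(_ERROR_MARKERS, j), as a test on the suffix starting at j
def pvStartsAny (s : List Char) : Bool := pvMarkers.any (fun m => PySem.Chars.startswith s m)

-- the generator scan: first j with a marker starting at j, else -1
def pvScan : Nat → List Char → Int
  | _, [] => -1
  | i, c :: r => if pvStartsAny (c :: r) then (i : Int) else pvScan (i + 1) r

def truncate_around_error_py_alt (text : String) (max_chars : Int) : String :=
  let t := text.toList
  let n : Int := t.length
  if n ≤ max_chars then text
  else
    let i := pvScan 0 t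
    let half := PySem.Int.floordiv max_chars 2
    if 0 ≤ i ∧ half ≤ i ∧ i ≤ n - half then
      let start := max 0 (i - PySem.Int.floordiv max_chars 3)
      let stop := min n (start + max_chars)
      String.ofList
        ((if start = 0 then ([] : List Char)
          else "...[head ".toList ++ PySem.Int.toChars start ++ " chars]...\n".toList)
          ++ PySem.List.slice t (some start) (some stop)
          ++ (if stop = n then ([] : List Char)
              else "\n...[tail ".toList ++ PySem.Int.toChars (n - stop) ++ " chars]...".toList))
    else
      String.ofList
        (PySem.List.slice t none (some half)
          ++ "\n\n...[truncated ".toList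
          ++ PySem.Int.toChars (n - max_chars)
          ++ " chars]...\n\n".toList
          ++ PySem.List.slice t (some (-half)) none)

-- ===== PRECONDITION & SPEC =====
def Spec_truncate_around_error_py (text : String) (max_chars : Int) (out : String) : Prop := out = truncate_around_error_py_alt text max_chars
instance (text : String) (max_chars : Int) (out : String) : Decidable (Spec_truncate_around_error_py text max_chars out) := by unfold Spec_truncate_around_error_py; infer_instance

-- ===== CLAIM (what is proved, stated in full; the proofs are below) =====
def Claim_equal_truncate_around_error_py : Prop := ∀ (text : String) (max_chars : Int), Dom_truncate_around_error_py text max_chars → Spec_truncate_around_error_py text max_chars (truncate_around_error_py text max_chars)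

-- ===== LEMMAS AND PROOFS =====

theorem pvStartsAny_nil : pvStartsAny [] = false := by decide

theorem pvStartsAny_iff (s : List Char) :
    pvStartsAny s = true ↔ ∃ m ∈ pvMarkers, m <+: s := by
  simp [pvStartsAny, List.any_eq_true, PySem.Chars.startswith_iff]

theorem pvFind_nonneg_of_prefix_drop (t m : List Char) (j : Nat) (h : m <+: t.drop j) :
    0 ≤ PySem.Chars.find t m := by
  rw [PySem.Chars.find_nonneg_iff, ← PySem.Chars.isIn_iff_infix,
    ← PySem.Chars.exists_prefix_drop_iff_isIn]
  exact ⟨j, h⟩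

theorem pvFind_le_of_prefix_drop (t m : List Char) (j : Nat) (h : m <+: t.drop j) :
    PySem.Chars.find t m ≤ (j : Int) := by
  have h0 := pvFind_nonneg_of_prefix_drop t m j h
  by_contra hlt
  push Not at hlt
  exact (PySem.Chars.find_spec h0).2 j (by omega) h

theorem pvScan_neg (t : List Char) : ∀ (i : Nat), pvScan i t = -1 →
    ∀ j, pvStartsAny (t.drop j) = false := by
  induction t with
  | nil => intro i _ j; simpa using pvStartsAny_nil
  | cons c r ih =>
    intro i h j
    by_cases hq : pvStartsAny (c :: r) = true
    · simp [pvScan, hq] at h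
    · have h' : pvStartsAny (c :: r) = false := eq_false_of_ne_true hq
      have hr : pvScan (i + 1) r = -1 := by simpa [pvScan, h'] using h
      cases j with
      | zero => simpa using h'
      | succ j => simpa using ih (i + 1) hr j

theorem pvScan_spec (t : List Char) : ∀ (i : Nat),
    pvScan i t = -1 ∨
      ∃ j : Nat, pvScan i t = ((i + j : Nat) : Int) ∧ pvStartsAny (t.drop j) = true ∧
        ∀ k < j, pvStartsAny (t.drop k) = false := by
  induction t with
  | nil => intro i; left; rfl
  | cons c r ih =>
    intro i
    by_cases hq : pvStartsAny (c :: r) = true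
    · right
      exact ⟨0, by simp [pvScan, hq], by simpa using hq, by omega⟩
    · have h' : pvStartsAny (c :: r) = false := eq_false_of_ne_true hq
      rcases ih (i + 1) with hneg | ⟨j, hj, hQ, hmin⟩
      · left; simpa [pvScan, h'] using hneg
      · right
        refine ⟨j + 1, ?_, by simpa using hQ, ?_⟩
        · have : pvScan i (c :: r) = pvScan (i + 1) r := by simp [pvScan, h']
          rw [this, hj]; push_cast; ring
        · intro k hk
          cases k with
          | zero => simpa using h'
          | succ k => simpa using hmin k (by omega)

theorem pvFoldA_all_neg (t : List Char) : ∀ (ms : List (List Char)) (a : Int),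
    (∀ m ∈ ms, PySem.Chars.find t m < 0) → ms.foldl (pvStepA t) a = a := by
  intro ms
  induction ms with
  | nil => intro a _; rfl
  | cons m ms ih =>
    intro a h
    have hm : PySem.Chars.find t m < 0 := h m (by simp)
    have hstep : pvStepA t a m = a := by
      simp only [pvStepA]
      rw [if_neg (by omega)]
    rw [List.foldl_cons, hstep]
    exact ih a (fun m' hm' => h m' (by simp [hm']))

theorem pvFoldA_mem (t : List Char) : ∀ (ms : List (List Char)) (a : Int),
    ms.foldl (pvStepA t) a = a ∨
      ∃ m ∈ ms, ms.foldl (pvStepA t) a = PySem.Chars.find t m ∧ 0 ≤ PySem.Chars.find t m := by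
  intro ms
  induction ms with
  | nil => intro a; left; rfl
  | cons m ms ih =>
    intro a
    rw [List.foldl_cons]
    rcases ih (pvStepA t a m) with heq | ⟨m', hm', heq, hpos⟩
    · rw [heq]
      simp only [pvStepA]
      split_ifs with h
      · exact Or.inr ⟨m, by simp, rfl, h.1⟩
      · exact Or.inl rfl
    · exact Or.inr ⟨m', by simp [hm'], heq, hpos⟩

theorem pvFoldA_le_acc (t : List Char) : ∀ (ms : List (List Char)) (a : Int), 0 ≤ a →
    0 ≤ ms.foldl (pvStepA t) a ∧ ms.foldl (pvStepA t) a ≤ a := by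
  intro ms
  induction ms with
  | nil => intro a ha; exact ⟨ha, le_refl a⟩
  | cons m ms ih =>
    intro a ha
    rw [List.foldl_cons]
    simp only [pvStepA]
    split_ifs with h
    · rcases ih (PySem.Chars.find t m) h.1 with ⟨h1, h2⟩
      exact ⟨h1, by omega⟩
    · exact ih a ha

theorem pvFoldA_le (t : List Char) : ∀ (ms : List (List Char)) (a : Int) (m0 : List Char),
    m0 ∈ ms → 0 ≤ PySem.Chars.find t m0 →
    0 ≤ ms.foldl (pvStepA t) a ∧ ms.foldl (pvStepA t) a ≤ PySem.Chars.find t m0 := by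
  intro ms
  induction ms with
  | nil => intro a m0 h; simp at h
  | cons m ms ih =>
    intro a m0 hmem hpos
    rw [List.foldl_cons]
    rcases List.mem_cons.mp hmem with rfl | hmem'
    · simp only [pvStepA]
      split_ifs with h
      · rcases pvFoldA_le_acc t ms (PySem.Chars.find t m0) hpos with ⟨h1, h2⟩
        exact ⟨h1, h2⟩
      · have h0 : ¬(a < 0 ∨ PySem.Chars.find t m0 < a) := fun hor => h ⟨hpos, hor⟩
        rcases pvFoldA_le_acc t ms a (by omega) with ⟨h1, h2⟩
        exact ⟨h1, by omega⟩
    · exact ih (pvStepA t a m) m0 hmem' hpos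

-- the crux: A's per-marker minimum equals B's positional scan
theorem pvFirst_eq (t : List Char) :
    pvMarkers.foldl (pvStepA t) (-1) = pvScan 0 t := by
  rcases pvScan_spec t 0 with hneg | ⟨j, hj, hQ, hmin⟩
  · rw [hneg]
    apply pvFoldA_all_neg
    intro m hm
    by_contra hge
    push Not at hge
    have hin : m <:+: t := (PySem.Chars.find_nonneg_iff t m).mp hge
    rw [← PySem.Chars.isIn_iff_infix, ← PySem.Chars.exists_prefix_drop_iff_isIn] at hin
    rcases hin with ⟨j, hpre⟩
    have : pvStartsAny (t.drop j) = true :=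
      (pvStartsAny_iff _).mpr ⟨m, ?_, hpre⟩
    · rw [pvScan_neg t 0 hneg j] at this; exact absurd this (by simp)
    · exact hm
  · simp only [Nat.zero_add] at hj
    rw [hj]
    rcases (pvStartsAny_iff _).mp hQ with ⟨m0, hm0, hpre0⟩
    have hf0 : 0 ≤ PySem.Chars.find t m0 := pvFind_nonneg_of_prefix_drop t m0 j hpre0
    have hfle : PySem.Chars.find t m0 ≤ (j : Int) := pvFind_le_of_prefix_drop t m0 j hpre0
    rcases pvFoldA_le t pvMarkers (-1) m0 hm0 hf0 with ⟨hr0, hrle⟩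
    rcases pvFoldA_mem t pvMarkers (-1) with heq | ⟨m1, _, heq, hpos1⟩
    · rw [heq] at hr0; omega
    · have hpre1 := (PySem.Chars.find_spec hpos1).1
      have hQr : pvStartsAny (t.drop (PySem.Chars.find t m1).toNat) = true :=
        (pvStartsAny_iff _).mpr ⟨m1, ‹m1 ∈ pvMarkers›, hpre1⟩
      have hjle : (j : Int) ≤ PySem.Chars.find t m1 := by
        by_contra hlt
        push Not at hlt
        have := hmin (PySem.Chars.find t m1).toNat (by omega)
        rw [this] at hQr; exact absurd hQr (by simp)
      rw [heq] at hr0 hrle ⊢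
      omega

-- ===== VERDICT (by name: the statement is the Claim_ definition above) =====
theorem truncate_around_error_py_spec : Claim_equal_truncate_around_error_py := by
  intro text max_chars _
  unfold Spec_truncate_around_error_py
  simp only [truncate_around_error_py, truncate_around_error_py_alt, pvFirst_eq]
  by_cases h1 : (text.toList.length : Int) ≤ max_chars
  · rw [if_pos h1, if_pos h1]
  · rw [if_neg h1, if_neg h1]
    by_cases h2 : pvScan 0 text.toList < 0 ∨
        pvScan 0 text.toList < PySem.Int.floordiv max_chars 2 ∨
        pvScan 0 text.toList > (text.toList.length : Int) - PySem.Int.floordiv max_chars 2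
    · rw [if_pos h2, if_neg (show ¬(0 ≤ pvScan 0 text.toList ∧
          PySem.Int.floordiv max_chars 2 ≤ pvScan 0 text.toList ∧
          pvScan 0 text.toList ≤ (text.toList.length : Int) - PySem.Int.floordiv max_chars 2) by omega)]
      simp only [pvTruncate, if_neg h1]
    · rw [if_neg h2, if_pos (show 0 ≤ pvScan 0 text.toList ∧
          PySem.Int.floordiv max_chars 2 ≤ pvScan 0 text.toList ∧
          pvScan 0 text.toList ≤ (text.toList.length : Int) - PySem.Int.floordiv max_chars 2 by omega)]
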